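-- pv_equiv track=rewrite | github.com/elisemyr/knowledge_graphs_project | backend/services/graduation_paths_service.py | all_topological_orders
-- ===== SOURCE A (Python) =====
-- from typing import Dict, List, Set, Union
--
-- def all_topological_orders(graph: Dict[str, Set[str]]) -> List[List[str]]:
--     """
--     Generate all possible topological orderings of courses.
--
--     Uses depth-first search with backtracking to enumerate all valid orderings
--     that respect prerequisite dependencies.
--
--     Args:
--         graph: Dictionary mapping courses to their prerequisite sets.
--
--     Returns:
--         List of all valid course orderings, where each ordering is a list of course codes.
--     """
--     results: List[List[str]] = []
--     visited: Set[str] = set()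
--     order: List[str] = []
--
--     def dfs() -> None:
--         added = False
--         for node in graph:
--             if node not in visited:
--                 # Check if all prerequisites are already in order
--                 if all(p in visited for p in graph[node]):
--                     visited.add(node)
--                     order.append(node)
--
--                     dfs()
--
--                     # Backtrack
--                     visited.remove(node)
--                     order.pop()
--
--                     added = True
--
--         if not added:
--             # Completed valid ordering
--             results.append(order.copy())
--
--     dfs()
--     return results
-- ===== SOURCE B (Python) =====
-- def all_topological_orders(graph):
--     """Enumerate all topological orderings via incremental in-degree counters:
--     a reverse-adjacency map is built once, and visiting a node decrements the
--     counters of its dependents instead of rescanning every prerequisite set."""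
--     keys = list(graph)
--     indeg = {v: len(graph[v]) for v in keys}
--     rev = {v: [] for v in keys}
--     for v in keys:
--         for p in graph[v]:
--             if p in rev:
--                 rev[p].append(v)
--
--     def go(indeg, order):
--         avail = [v for v in keys if indeg[v] == 0]
--         if not avail:
--             return [order]
--         res = []
--         for v in avail:
--             nd = dict(indeg)
--             nd[v] = -1
--             for u in rev[v]:
--                 nd[u] = nd[u] - 1
--             res.extend(go(nd, order + [v]))
--         return res
--
--     return go(indeg, [])
-- ===== Notes on version B (the rewrite author's own statement) =====
-- stated objective: alternative
-- what changed: B builds a reverse-adjacency map and in-degree counters once and updates the counters incrementally when a node is visited, so each recursion level filters by counter==0 instead of rescanning every node's whole prerequisite set; the recursion also returns and concatenates result lists instead of mutating shared visited/order/results state.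
import Mathlib
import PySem

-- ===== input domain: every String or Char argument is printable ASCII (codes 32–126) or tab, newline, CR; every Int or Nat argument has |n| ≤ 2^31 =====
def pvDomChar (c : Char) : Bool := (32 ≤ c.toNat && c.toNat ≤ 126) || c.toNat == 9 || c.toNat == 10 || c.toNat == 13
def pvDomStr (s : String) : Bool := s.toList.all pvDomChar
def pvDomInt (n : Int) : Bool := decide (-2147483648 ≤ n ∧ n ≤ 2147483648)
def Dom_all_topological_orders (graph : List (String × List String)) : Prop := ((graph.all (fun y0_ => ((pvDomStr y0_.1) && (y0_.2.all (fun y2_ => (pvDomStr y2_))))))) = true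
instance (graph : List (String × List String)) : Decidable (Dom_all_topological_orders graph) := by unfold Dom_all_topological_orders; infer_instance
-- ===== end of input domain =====

-- B replaces A's per-level rescan of every prerequisite set by incremental in-degree
-- counters with a reverse-adjacency map built once (objective: alternative; same output).
-- Both ports normalise the dict argument with PySem.Dict.ofList (Python builds the dict
-- before the function runs) and model the recursion with fuel d.keys.length + 1, which
-- the recursion depth never exhausts (each level visits a fresh key).

-- ===== PORT A =====
-- literal port of A's dfs: visited/order are restored by the backtracking, so the
-- recursive call is written as 'recurse with extended visited/order, keep the old ones'.
def pvDfsA (d : PySem.Dict String (List String)) : Nat → PySem.Set String → List String → List (List String) → List (List String)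
  | 0, _, _, results => results   -- fuel exhausted (never reached from the top-level call)
  | fuel+1, visited, order, results =>
      let st := d.keys.foldl (fun (st : Bool × List (List String)) node =>
        if !visited.contains node && (d.getD node []).all (fun p => visited.contains p) then
          (true, pvDfsA d fuel (PySem.Set.add visited node) (order ++ [node]) st.2)
        else st) (false, results)
      if st.1 then st.2 else st.2 ++ [order]

def all_topological_orders (graph : List (String × List String)) : List (List String) :=
  let d := PySem.Dict.ofList graph
  pvDfsA d (d.keys.length + 1) PySem.Set.empty [] []

-- ===== PORT B =====
-- initial in-degree counters: indeg[v] = len(graph[v])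
def pvIndeg0 (d : PySem.Dict String (List String)) : PySem.Dict String Int :=
  d.keys.foldl (fun m v => m.insert v ((d.getD v []).length : Int)) PySem.Dict.empty

-- reverse adjacency: rev[p] lists (in key order) the nodes that have prerequisite p
def pvRev (d : PySem.Dict String (List String)) : PySem.Dict String (List String) :=
  let rev0 := d.keys.foldl (fun m v => m.insert v ([] : List String)) PySem.Dict.empty
  d.keys.foldl (fun m v =>
    (d.getD v []).foldl (fun m p =>
      if m.contains p then m.modify p [] (fun xs => xs ++ [v]) else m) m) rev0

def pvGoB (keys : List String) (rev : PySem.Dict String (List String)) : Nat → PySem.Dict String Int → List String → List (List String)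
  | 0, _, _ => []   -- fuel exhausted (never reached from the top-level call)
  | fuel+1, indeg, order =>
      let avail := keys.filter (fun v => indeg.getD v 0 == 0)
      if avail.isEmpty then [order]
      else avail.foldl (fun res v =>
        let nd := (rev.getD v []).foldl (fun m u => m.modify u 0 (fun x => x - 1)) (indeg.insert v (-1))
        res ++ pvGoB keys rev fuel nd (order ++ [v])) []

def all_topological_orders_alt (graph : List (String × List String)) : List (List String) :=
  let d := PySem.Dict.ofList graph
  pvGoB d.keys (pvRev d) (d.keys.length + 1) (pvIndeg0 d) []

-- ===== PRECONDITION & SPEC =====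
def Spec_all_topological_orders (graph : List (String × List String)) (out : List (List String)) : Prop := out = all_topological_orders_alt graph
instance (graph : List (String × List String)) (out : List (List String)) : Decidable (Spec_all_topological_orders graph out) := by unfold Spec_all_topological_orders; infer_instance

-- ===== CLAIM (what is proved, stated in full; the proofs are below) =====
def Claim_equal_all_topological_orders : Prop := ∀ (graph : List (String × List String)), Dom_all_topological_orders graph → Spec_all_topological_orders graph (all_topological_orders graph)

-- ===== LEMMAS AND PROOFS =====

-- number of prerequisites of v not yet visited
def pvUnmet (d : PySem.Dict String (List String)) (visited : PySem.Set String) (v : String) : Nat :=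
  (d.getD v []).countP (fun p => !visited.contains p)

-- the counter invariant: visited keys carry a negative counter, unvisited keys the
-- exact number of their not-yet-visited prerequisites
def pvInv (d : PySem.Dict String (List String)) (visited : PySem.Set String) (indeg : PySem.Dict String Int) : Prop :=
  ∀ v ∈ d.keys, (v ∈ visited → indeg.getD v 0 < 0) ∧ (v ∉ visited → indeg.getD v 0 = (pvUnmet d visited v : Nat))

theorem pvFoldPair (g : String → List (List String) → List (List String))
    (keys : List String) (P : String → Bool) (b0 : Bool) (res : List (List String)) :
    keys.foldl (fun st node => if P node then (true, g node st.2) else st) (b0, res)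
      = (b0 || !(keys.filter P).isEmpty, (keys.filter P).foldl (fun res node => g node res) res) := by
  induction keys generalizing b0 res with
  | nil => simp
  | cons x xs ih =>
    by_cases hx : P x = true
    · simp [hx, ih]
    · simp only [Bool.not_eq_true] at hx
      simp [hx, ih]

theorem pvFoldSub (l : List String) (m : PySem.Dict String Int) (v : String) :
    (l.foldl (fun m u => m.modify u 0 (fun x => x - 1)) m).getD v 0
      = m.getD v 0 - (l.count v : Int) := by
  induction l generalizing m with
  | nil => simp
  | cons u l ih =>
    simp only [List.foldl_cons, ih, PySem.Dict.getD_modify, List.count_cons]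
    by_cases h : v = u
    · simp [h]; omega
    · have : (u == v) = false := by simp [Ne.symm h]
      simp [h, this]

theorem pvFoldInsert {ν : Type} (ks : List String) (f : String → ν) (m : PySem.Dict String ν) (d0 : ν) (q : String) :
    (ks.foldl (fun m v => m.insert v (f v)) m).getD q d0
      = if q ∈ ks then f q else m.getD q d0 := by
  induction ks generalizing m with
  | nil => simp
  | cons v ks ih =>
    simp only [List.foldl_cons, ih, List.mem_cons]
    by_cases h : q ∈ ks
    · simp [h]
    · simp only [h, if_false, or_false, PySem.Dict.getD_insert]
      by_cases hq : q = v <;> simp [hq]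

theorem pvFoldInsertContains {ν : Type} (ks : List String) (f : String → ν) (m : PySem.Dict String ν) (q : String) :
    (ks.foldl (fun m v => m.insert v (f v)) m).contains q
      = (decide (q ∈ ks) || m.contains q) := by
  induction ks generalizing m with
  | nil => simp
  | cons v ks ih =>
    simp only [List.foldl_cons, ih, PySem.Dict.contains_insert, List.mem_cons]
    by_cases hq : q = v
    · simp [hq]
    · have hb : (q == v) = false := by simp [hq]
      simp [hq, hb]

theorem pvRevInnerContains (l : List String) (v : String) (m : PySem.Dict String (List String)) (q : String) :
    ((l.foldl (fun m p => if m.contains p then m.modify p [] (fun xs => xs ++ [v]) else m) m).contains q)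
      = m.contains q := by
  induction l generalizing m with
  | nil => rfl
  | cons p l ih =>
    simp only [List.foldl_cons]
    by_cases hp : m.contains p = true
    · simp only [hp, if_true, ih, PySem.Dict.contains_modify]
      by_cases hq : q = p
      · subst hq; simp [hp]
      · have hb : (q == p) = false := by simp [hq]
        simp [hb]
    · simp only [Bool.not_eq_true] at hp
      simp [hp, ih]

theorem pvRevInner (l : List String) (v : String) (m : PySem.Dict String (List String)) (q : String) :
    (l.foldl (fun m p => if m.contains p then m.modify p [] (fun xs => xs ++ [v]) else m) m).getD q []
      = m.getD q [] ++ (if m.contains q then List.replicate (l.count q) v else []) := by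
  induction l generalizing m with
  | nil => simp
  | cons p l ih =>
    simp only [List.foldl_cons, List.count_cons]
    by_cases hp : m.contains p = true
    · rw [if_pos hp, ih]
      by_cases hq : q = p
      · subst hq
        simp [PySem.Dict.getD_modify_self, PySem.Dict.contains_modify, hp, List.replicate_succ]
      · have : (p == q) = false := by simp [Ne.symm hq]
        simp [PySem.Dict.getD_modify, PySem.Dict.contains_modify, hq, this]
    · simp only [Bool.not_eq_true] at hp
      rw [if_neg (by simp [hp]), ih]
      by_cases hq : q = p
      · subst hq; simp [hp]
      · have : (p == q) = false := by simp [Ne.symm hq]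
        simp [this]

theorem pvRevOuter (d : PySem.Dict String (List String)) (ks : List String) (m : PySem.Dict String (List String)) (q : String) :
    (ks.foldl (fun m v =>
        (d.getD v []).foldl (fun m p =>
          if m.contains p then m.modify p [] (fun xs => xs ++ [v]) else m) m) m).getD q []
      = m.getD q [] ++ (if m.contains q then ks.flatMap (fun v => List.replicate ((d.getD v []).count q) v) else []) := by
  induction ks generalizing m with
  | nil => simp
  | cons v ks ih =>
    simp only [List.foldl_cons, ih, pvRevInner, pvRevInnerContains, List.flatMap_cons]
    by_cases hq : m.contains q = true
    · simp [hq, List.append_assoc]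
    · simp only [Bool.not_eq_true] at hq
      simp [hq]

theorem pvRevGetD (d : PySem.Dict String (List String)) (q : String) (hq : q ∈ d.keys) :
    (pvRev d).getD q [] = d.keys.flatMap (fun v => List.replicate ((d.getD v []).count q) v) := by
  unfold pvRev
  rw [pvRevOuter]
  rw [pvFoldInsert, pvFoldInsertContains]
  simp [hq]

theorem pvCountFlatMapReplicate (ks : List String) (c : String → Nat) (v : String)
    (hnd : ks.Nodup) (hv : v ∈ ks) :
    (ks.flatMap (fun u => List.replicate (c u) u)).count v = c v := by
  induction ks with
  | nil => simp at hv
  | cons u ks ih =>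
    simp only [List.flatMap_cons, List.count_append, List.count_replicate]
    rcases List.mem_cons.mp hv with h | h
    · subst h
      have hnv : v ∉ ks := (List.nodup_cons.mp hnd).1
      have : (ks.flatMap (fun u => List.replicate (c u) u)).count v = 0 := by
        rw [List.count_eq_zero]
        intro hmem
        rcases List.mem_flatMap.mp hmem with ⟨u, hu, hrep⟩
        have hvu := List.eq_of_mem_replicate hrep
        subst hvu; exact hnv hu
      simp [this]
    · have hne : v ≠ u := by rintro rfl; exact (List.nodup_cons.mp hnd).1 h
      have hb : (v == u) = false := by simp [hne]
      have hb2 : (u == v) = false := by simp [Ne.symm hne]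
      simp [hb2, ih (List.nodup_cons.mp hnd).2 h]

theorem pvCountPAdd (l : List String) (visited : PySem.Set String) (node : String) (h : node ∉ visited) :
    l.countP (fun p => !(PySem.Set.add visited node).contains p) + l.count node
      = l.countP (fun p => !visited.contains p) := by
  induction l with
  | nil => simp
  | cons p l ih =>
    simp only [List.countP_cons, List.count_cons]
    by_cases hp : p = node
    · subst hp
      have h1 : (PySem.Set.add visited p).contains p = true := by
        simp [PySem.Set.mem_add]
      have h2 : visited.contains p = false := by
        simpa using h
      simp only [h1, h2, Bool.not_true, Bool.not_false, Bool.false_eq_true,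
        if_false, if_true, beq_self_eq_true]
      omega
    · have hb : (p == node) = false := by simp [hp]
      have h1 : (PySem.Set.add visited node).contains p = visited.contains p := by
        simp [PySem.Set.mem_add, hp]
      rw [h1]
      cases hvp : visited.contains p <;>
        simp only [hb, Bool.not_false, Bool.not_true, Bool.false_eq_true,
          if_true, if_false] <;> omega

theorem pvInv0 (d : PySem.Dict String (List String)) : pvInv d PySem.Set.empty (pvIndeg0 d) := by
  intro v hv
  constructor
  · intro hmem; simp [PySem.Set.empty] at hmem
  · intro _
    unfold pvIndeg0 pvUnmet
    rw [pvFoldInsert]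
    simp [hv, PySem.Set.empty]

theorem pvInvStep (d : PySem.Dict String (List String)) (hnd : d.keys.Nodup)
    (visited : PySem.Set String) (indeg : PySem.Dict String Int)
    (node : String) (hk : node ∈ d.keys) (hnv : node ∉ visited) (hinv : pvInv d visited indeg) :
    pvInv d (PySem.Set.add visited node)
      (((pvRev d).getD node []).foldl (fun m u => m.modify u 0 (fun x => x - 1)) (indeg.insert node (-1))) := by
  intro v hv
  have hcount : ((pvRev d).getD node []).count v = (d.getD v []).count node := by
    rw [pvRevGetD d node hk]
    exact pvCountFlatMapReplicate d.keys (fun u => (d.getD u []).count node) v hnd hv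
  have hgd : (((pvRev d).getD node []).foldl (fun m u => m.modify u 0 (fun x => x - 1)) (indeg.insert node (-1))).getD v 0
      = (indeg.insert node (-1)).getD v 0 - ((d.getD v []).count node : Int) := by
    rw [pvFoldSub, hcount]
  constructor
  · intro hmem
    rw [hgd]
    rcases (PySem.Set.mem_add _ _ _).mp hmem with hmem' | rfl
    · by_cases hvn : v = node
      · subst hvn; rw [PySem.Dict.getD_insert_self]; omega
      · rw [PySem.Dict.getD_insert]
        rw [if_neg hvn]
        have := (hinv v hv).1 hmem'
        omega
    · rw [PySem.Dict.getD_insert_self]; omega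
  · intro hmem
    have hvn : v ≠ node := by rintro rfl; exact hmem ((PySem.Set.mem_add _ _ _).mpr (Or.inr rfl))
    have hmem' : v ∉ visited := fun hx => hmem ((PySem.Set.mem_add _ _ _).mpr (Or.inl hx))
    rw [hgd, PySem.Dict.getD_insert, if_neg hvn, (hinv v hv).2 hmem']
    have hc := pvCountPAdd (d.getD v []) visited node hnv
    unfold pvUnmet
    omega

theorem pvMain (d : PySem.Dict String (List String)) (hnd : d.keys.Nodup) :
    ∀ (fuel : Nat) (visited : PySem.Set String) (indeg : PySem.Dict String Int)
      (order : List String) (results : List (List String)), pvInv d visited indeg →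
      pvDfsA d fuel visited order results = results ++ pvGoB d.keys (pvRev d) fuel indeg order := by
  intro fuel
  induction fuel with
  | zero => intro visited indeg order results _; simp [pvDfsA, pvGoB]
  | succ fuel ih =>
    intro visited indeg order results hinv
    have hfilter : d.keys.filter (fun node => !visited.contains node && (d.getD node []).all (fun p => visited.contains p))
        = d.keys.filter (fun v => indeg.getD v 0 == 0) := by
      apply List.filter_congr
      intro v hv
      rcases hinv v hv with ⟨h1, h2⟩
      by_cases hmem : v ∈ visited
      · have hcv : visited.contains v = true := by simpa using hmem
        have hlt := h1 hmem
        have hne : indeg.getD v 0 ≠ 0 := by omega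
        rw [hcv]
        simp only [Bool.not_true, Bool.false_and]
        symm
        rw [beq_eq_false_iff_ne]
        exact hne
      · have hcv : visited.contains v = false := by simpa using hmem
        rw [hcv, h2 hmem]
        simp only [Bool.not_false, Bool.true_and]
        have hiff : ((d.getD v []).all (fun p => visited.contains p) = true) ↔ pvUnmet d visited v = 0 := by
          rw [pvUnmet, List.countP_eq_zero, List.all_eq_true]
          constructor
          · intro hall p hp; simpa using hall p hp
          · intro hz p hp; simpa using hz p hp
        by_cases hall : (d.getD v []).all (fun p => visited.contains p) = true
        · rw [hall]
          symm
          rw [beq_iff_eq]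
          exact_mod_cast hiff.mp hall
        · simp only [Bool.not_eq_true] at hall
          rw [hall]
          symm
          rw [beq_eq_false_iff_ne]
          intro hz
          have h0 : pvUnmet d visited v = 0 := by exact_mod_cast hz
          have hcontr := hiff.mpr h0
          rw [hall] at hcontr
          exact Bool.false_ne_true hcontr
    simp only [pvDfsA, pvGoB]
    rw [pvFoldPair (fun node res => pvDfsA d fuel (visited.add node) (order ++ [node]) res) d.keys
      (fun node => !visited.contains node && (d.getD node []).all (fun p => visited.contains p))]
    rw [hfilter]
    simp only [Bool.false_or]
    by_cases hemp : (d.keys.filter (fun v => indeg.getD v 0 == 0)).isEmpty = true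
    · rw [List.isEmpty_iff] at hemp
      simp [hemp]
    · simp only [Bool.not_eq_true] at hemp
      rw [hemp]
      simp only [Bool.not_false, if_true]
      have hcongr : (d.keys.filter (fun v => indeg.getD v 0 == 0)).foldl
            (fun (res : List (List String)) node => pvDfsA d fuel (visited.add node) (order ++ [node]) res) results
          = (d.keys.filter (fun v => indeg.getD v 0 == 0)).foldl
            (fun res node => res ++ pvGoB d.keys (pvRev d) fuel
                (((pvRev d).getD node []).foldl (fun m u => m.modify u 0 (fun x => x - 1)) (indeg.insert node (-1)))
                (order ++ [node])) results := by
        apply PySem.List.foldl_congr_mem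
        intro acc node hnode
        have hnode' := hnode
        rw [← hfilter] at hnode'
        have hk : node ∈ d.keys := (List.mem_filter.mp hnode').1
        have hnv : node ∉ visited := by
          have := (List.mem_filter.mp hnode').2
          simp at this
          exact this.1
        exact ih (visited.add node) _ (order ++ [node]) acc (pvInvStep d hnd visited indeg node hk hnv hinv)
      rw [hcongr]
      rw [PySem.List.foldl_append_eq_flatMap, PySem.List.foldl_append_eq_flatMap]
      simp

-- ===== VERDICT (by name: the statement is the Claim_ definition above) =====
theorem all_topological_orders_spec : Claim_equal_all_topological_orders := by
  intro graph _
  unfold Spec_all_topological_orders all_topological_orders all_topological_orders_alt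
  simpa using pvMain (PySem.Dict.ofList graph) (PySem.Dict.nodup_keys_ofList graph)
    ((PySem.Dict.ofList graph).keys.length + 1) PySem.Set.empty
    (pvIndeg0 (PySem.Dict.ofList graph)) [] [] (pvInv0 (PySem.Dict.ofList graph))
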